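-- pv_equiv track=rewrite | github.com/tersec/archive-diff | treediff.py | get_compatible_concurrent_copies
-- ===== SOURCE A (Python) =====
-- def get_compatible_concurrent_copies(copy_paths):
--     # find_common_copies is expensive, so call it as little as possible.
--     from itertools import product
--
--     allowed_copies = []
--
--     # This assumes most_common ordering.
--     for copy_from, copy_to in copy_paths:
--         if any(
--             (
--                 any(
--                     (
--                         path0 == path1[: len(path0)] or path1 == path0[: len(path1)]
--                         for path0, path1 in product(
--                             (copy_from, copy_to), (allowed_copy_from, allowed_copy_to)
--                         )
--                     )
--                 )
--                 for allowed_copy_from, allowed_copy_to in allowed_copies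
--             )
--         ):
--             continue
--         allowed_copies.append((copy_from, copy_to))
--
--     return allowed_copies
-- ===== SOURCE B (Python) =====
-- def _conflict(s, terminals, lengths, bylen):
--     # s clashes iff some accepted path is a prefix of s (check s[:l] for each
--     # accepted length l) or s is a prefix of an accepted path (s is among the
--     # length-len(s) slices of the accepted paths, materialised on demand).
--     k = len(s)
--     if k not in bylen:
--         bylen[k] = {a[:k] for a in terminals}
--     if s in bylen[k]:
--         return True
--     return any(l <= k and s[:l] in terminals for l in lengths)
--
--
-- def get_compatible_concurrent_copies(copy_paths):
--     allowed = []
--     terminals = set()  # accepted path strings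
--     lengths = set()    # their lengths
--     bylen = {}         # queried length k -> {a[:k] for accepted a}
--     for f, t in copy_paths:
--         if _conflict(f, terminals, lengths, bylen) or _conflict(t, terminals, lengths, bylen):
--             continue
--         allowed.append((f, t))
--         for s in (f, t):
--             terminals.add(s)
--             lengths.add(len(s))
--             for k in bylen:
--                 bylen[k].add(s[:k])
--     return allowed
-- ===== Notes on version B (the rewrite author's own statement) =====
-- stated objective: faster
-- what changed: Replaces A's scan of all previously accepted pairs (4 sliced string comparisons each) per candidate by hash sets maintained incrementally - the accepted path strings, their lengths, and per queried length k the set of length-k slices of accepted paths (materialised on demand) - so each candidate path is decided by one lookup per distinct accepted length plus one slice-set lookup.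
import Mathlib
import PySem

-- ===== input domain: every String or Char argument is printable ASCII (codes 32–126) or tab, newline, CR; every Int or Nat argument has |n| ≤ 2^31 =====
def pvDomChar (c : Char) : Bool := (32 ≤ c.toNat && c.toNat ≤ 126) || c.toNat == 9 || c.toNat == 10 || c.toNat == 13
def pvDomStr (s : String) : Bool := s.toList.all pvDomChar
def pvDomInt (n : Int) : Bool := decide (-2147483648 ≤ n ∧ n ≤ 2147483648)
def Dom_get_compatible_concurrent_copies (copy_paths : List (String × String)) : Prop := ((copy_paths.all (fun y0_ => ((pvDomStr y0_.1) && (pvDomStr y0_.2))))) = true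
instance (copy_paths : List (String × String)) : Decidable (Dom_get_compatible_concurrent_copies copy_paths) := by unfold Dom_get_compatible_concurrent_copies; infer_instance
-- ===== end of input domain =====

-- B replaces A's rescan of every accepted pair per candidate by hash sets of the
-- accepted path strings, their lengths, and (per queried length, on demand) their
-- length-k slices, so each candidate is checked by set lookups instead of a pair scan.

-- ===== PORT A =====
-- path0 == path1[:len(path0)] or path1 == path0[:len(path1)]
def pvPrefEq (p0 p1 : String) : Bool :=
  (p0 == PySem.Str.slice p1 none (some (PySem.Str.len p0))) ||
  (p1 == PySem.Str.slice p0 none (some (PySem.Str.len p1)))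

-- one iteration of A's loop: skip the pair if any of the 4 product combinations clashes
def pvStepA (allowed : List (String × String)) (ft : String × String) : List (String × String) :=
  if allowed.any (fun ac =>
      ([(ft.1, ac.1), (ft.1, ac.2), (ft.2, ac.1), (ft.2, ac.2)]).any
        (fun pq => pvPrefEq pq.1 pq.2))
  then allowed
  else allowed ++ [ft]

def get_compatible_concurrent_copies (copy_paths : List (String × String)) : List (String × String) :=
  copy_paths.foldl pvStepA []

-- ===== PORT B =====
-- 'if k not in bylen: bylen[k] = {a[:k] for a in terminals}'
def pvMaterialize (s : String) (terminals : PySem.Set String)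
    (bylen : PySem.Dict Int (PySem.Set String)) : PySem.Dict Int (PySem.Set String) :=
  if bylen.contains (PySem.Str.len s) then bylen
  else bylen.insert (PySem.Str.len s)
    (PySem.Set.ofList (terminals.map (fun a => PySem.Str.slice a none (some (PySem.Str.len s)))))

-- _conflict(s, terminals, lengths, bylen); returns the flag and the updated bylen
def pvConflict (s : String) (terminals : PySem.Set String) (lengths : PySem.Set Int)
    (bylen : PySem.Dict Int (PySem.Set String)) :
    Bool × PySem.Dict Int (PySem.Set String) :=
  if PySem.Set.contains
      ((pvMaterialize s terminals bylen).getD (PySem.Str.len s) PySem.Set.empty) s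
  then (true, pvMaterialize s terminals bylen)
  else (lengths.any (fun l => decide (l ≤ PySem.Str.len s) &&
          PySem.Set.contains terminals (PySem.Str.slice s none (some l))),
        pvMaterialize s terminals bylen)

-- 'terminals.add(s); lengths.add(len(s)); for k in bylen: bylen[k].add(s[:k])'
def pvRecord (st : PySem.Set String × PySem.Set Int × PySem.Dict Int (PySem.Set String))
    (s : String) : PySem.Set String × PySem.Set Int × PySem.Dict Int (PySem.Set String) :=
  (PySem.Set.add st.1 s,
   PySem.Set.add st.2.1 (PySem.Str.len s),
   st.2.2.keys.foldl
     (fun d k => d.modify k PySem.Set.empty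
        (fun S => PySem.Set.add S (PySem.Str.slice s none (some k)))) st.2.2)

def pvStepB
    (st : List (String × String) × PySem.Set String × PySem.Set Int × PySem.Dict Int (PySem.Set String))
    (ft : String × String) :
    List (String × String) × PySem.Set String × PySem.Set Int × PySem.Dict Int (PySem.Set String) :=
  let c1 := pvConflict ft.1 st.2.1 st.2.2.1 st.2.2.2
  if c1.1 then (st.1, st.2.1, st.2.2.1, c1.2)
  else
    let c2 := pvConflict ft.2 st.2.1 st.2.2.1 c1.2
    if c2.1 then (st.1, st.2.1, st.2.2.1, c2.2)
    else (st.1 ++ [ft], ([ft.1, ft.2]).foldl pvRecord (st.2.1, st.2.2.1, c2.2))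

def get_compatible_concurrent_copies_alt (copy_paths : List (String × String)) : List (String × String) :=
  (copy_paths.foldl pvStepB ([], PySem.Set.empty, PySem.Set.empty, PySem.Dict.empty)).1

-- ===== PRECONDITION & SPEC =====
def Spec_get_compatible_concurrent_copies (copy_paths : List (String × String)) (out : List (String × String)) : Prop := out = get_compatible_concurrent_copies_alt copy_paths
instance (copy_paths : List (String × String)) (out : List (String × String)) : Decidable (Spec_get_compatible_concurrent_copies copy_paths out) := by unfold Spec_get_compatible_concurrent_copies; infer_instance

-- ===== CLAIM (what is proved, stated in full; the proofs are below) =====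
def Claim_equal_get_compatible_concurrent_copies : Prop := ∀ (copy_paths : List (String × String)), Dom_get_compatible_concurrent_copies copy_paths → Spec_get_compatible_concurrent_copies copy_paths (get_compatible_concurrent_copies copy_paths)

-- ===== LEMMAS AND PROOFS =====

-- the symmetric prefix-clash relation both programs decide
def pvRel (x a : String) : Prop := x.toList <+: a.toList ∨ a.toList <+: x.toList

lemma pv_beq_slice_iff (x s : String) :
    ((x == PySem.Str.slice s none (some (PySem.Str.len x))) = true) ↔ x.toList <+: s.toList := by
  rw [beq_iff_eq, String.ext_iff, PySem.Str.toList_slice]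
  simp only [PySem.Chars.slice_eq_listSlice, PySem.Str.len]
  rw [PySem.List.slice_to_natCast]
  exact Iff.symm List.prefix_iff_eq_take

lemma pv_eq_slice_iff (x s : String) :
    (x = PySem.Str.slice s none (some (PySem.Str.len x))) ↔ x.toList <+: s.toList := by
  rw [← pv_beq_slice_iff, beq_iff_eq]

lemma pvPrefEq_iff (p0 p1 : String) : pvPrefEq p0 p1 = true ↔ pvRel p0 p1 := by
  simp only [pvPrefEq, Bool.or_eq_true, pv_beq_slice_iff, pvRel]

lemma pv_contains_iff (S : PySem.Set String) (x : String) :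
    PySem.Set.contains S x = true ↔ x ∈ S := by
  simp [PySem.Set.contains]

lemma pv_len_nonneg (s : String) : 0 ≤ PySem.Str.len s := by
  simp [PySem.Str.len]

-- strings recorded for an accepted list
def pvStrs (allowed : List (String × String)) : List String :=
  allowed.flatMap (fun p => [p.1, p.2])

lemma pv_mem_strs (allowed : List (String × String)) (x : String) :
    x ∈ pvStrs allowed ↔ ∃ p ∈ allowed, x = p.1 ∨ x = p.2 := by
  simp [pvStrs, List.mem_flatMap]

-- A's guard over allowed = disjunction of the two conflict tests over pvStrs
lemma pv_guard_iff (f t : String) (allowed : List (String × String)) :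
    (allowed.any (fun ac =>
        ([(f, ac.1), (f, ac.2), (t, ac.1), (t, ac.2)]).any
          (fun pq => pvPrefEq pq.1 pq.2)) = true)
      ↔ (∃ a ∈ pvStrs allowed, pvRel f a) ∨ (∃ a ∈ pvStrs allowed, pvRel t a) := by
  simp only [List.any_eq_true, pvPrefEq_iff]
  constructor
  · rintro ⟨ac, hac, pq, hpq, hrel⟩
    simp only [List.mem_cons, List.not_mem_nil, or_false] at hpq
    have h1 : ac.1 ∈ pvStrs allowed := (pv_mem_strs _ _).mpr ⟨ac, hac, Or.inl rfl⟩
    have h2 : ac.2 ∈ pvStrs allowed := (pv_mem_strs _ _).mpr ⟨ac, hac, Or.inr rfl⟩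
    rcases hpq with rfl | rfl | rfl | rfl
    · exact Or.inl ⟨ac.1, h1, hrel⟩
    · exact Or.inl ⟨ac.2, h2, hrel⟩
    · exact Or.inr ⟨ac.1, h1, hrel⟩
    · exact Or.inr ⟨ac.2, h2, hrel⟩
  · rintro (⟨a, ha, hrel⟩ | ⟨a, ha, hrel⟩)
    · obtain ⟨p, hp, hcase⟩ := (pv_mem_strs _ _).mp ha
      rcases hcase with rfl | rfl
      · exact ⟨p, hp, (f, p.1), by simp, hrel⟩
      · exact ⟨p, hp, (f, p.2), by simp, hrel⟩
    · obtain ⟨p, hp, hcase⟩ := (pv_mem_strs _ _).mp ha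
      rcases hcase with rfl | rfl
      · exact ⟨p, hp, (t, p.1), by simp, hrel⟩
      · exact ⟨p, hp, (t, p.2), by simp, hrel⟩

-- the bylen invariant: every materialised bucket k holds exactly the length-k slices
def pvIB (L : List String) (bylen : PySem.Dict Int (PySem.Set String)) : Prop :=
  ∀ k, bylen.contains k = true →
    ∀ x, x ∈ bylen.getD k PySem.Set.empty ↔ ∃ a ∈ L, x = PySem.Str.slice a none (some k)

-- the loop invariant
def pvInv (allowed : List (String × String)) (T : PySem.Set String) (Lens : PySem.Set Int)
    (bylen : PySem.Dict Int (PySem.Set String)) : Prop :=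
  (∀ x, x ∈ T ↔ x ∈ pvStrs allowed) ∧
  (∀ l, l ∈ Lens ↔ ∃ a ∈ pvStrs allowed, l = PySem.Str.len a) ∧
  pvIB (pvStrs allowed) bylen ∧
  bylen.keys.Nodup

-- direction 1: some accepted string is a prefix of s
lemma pv_any_len_iff (s : String) (T : PySem.Set String) (Lens : PySem.Set Int) (L : List String)
    (hT : ∀ x, x ∈ T ↔ x ∈ L)
    (hL : ∀ l, l ∈ Lens ↔ ∃ a ∈ L, l = PySem.Str.len a) :
    (Lens.any (fun l => decide (l ≤ PySem.Str.len s) &&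
        PySem.Set.contains T (PySem.Str.slice s none (some l))) = true)
      ↔ ∃ a ∈ L, a.toList <+: s.toList := by
  rw [List.any_eq_true]
  constructor
  · rintro ⟨l, hl, hc⟩
    rw [Bool.and_eq_true, decide_eq_true_eq, pv_contains_iff, hT] at hc
    obtain ⟨a0, _, rfl⟩ := (hL l).mp hl
    refine ⟨_, hc.2, ?_⟩
    have hs : (PySem.Str.slice s none (some (PySem.Str.len a0))).toList
        = s.toList.take (PySem.Str.len a0).toNat := by
      rw [PySem.Str.toList_slice]
      simp only [PySem.Chars.slice_eq_listSlice]
      exact PySem.List.slice_to s.toList (pv_len_nonneg a0)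
    rw [hs]
    exact List.take_prefix _ _
  · rintro ⟨a, ha, hpre⟩
    refine ⟨PySem.Str.len a, (hL _).mpr ⟨a, ha, rfl⟩, ?_⟩
    rw [Bool.and_eq_true, decide_eq_true_eq, pv_contains_iff, hT]
    refine ⟨?_, ?_⟩
    · have := hpre.length_le
      simp only [PySem.Str.len]
      omega
    · rw [← (pv_eq_slice_iff a s).mpr hpre]
      exact ha

-- getD after the 'for k in bylen' modify loop
lemma pv_foldl_modify_getD (g : Int → PySem.Set String → PySem.Set String) (ks : List Int) :
    ∀ (d : PySem.Dict Int (PySem.Set String)) (k0 : Int), ks.Nodup →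
      (ks.foldl (fun d k => d.modify k PySem.Set.empty (g k)) d).getD k0 PySem.Set.empty
        = if k0 ∈ ks then g k0 (d.getD k0 PySem.Set.empty) else d.getD k0 PySem.Set.empty := by
  induction ks with
  | nil => intro d k0 _; simp
  | cons k ks ih =>
    intro d k0 hnd
    rw [List.nodup_cons] at hnd
    rw [List.foldl_cons, ih _ _ hnd.2, PySem.Dict.getD_modify]
    by_cases h1 : k0 ∈ ks
    · have hne : ¬ k0 = k := fun h => hnd.1 (h ▸ h1)
      simp [h1, hne, List.mem_cons]
    · by_cases h2 : k0 = k
      · subst h2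
        simp [h1]
      · simp [h1, h2]

lemma pv_foldl_modify_contains (g : Int → PySem.Set String → PySem.Set String) (ks : List Int) :
    ∀ (d : PySem.Dict Int (PySem.Set String)) (k0 : Int),
      (ks.foldl (fun d k => d.modify k PySem.Set.empty (g k)) d).contains k0 = true
        ↔ k0 ∈ ks ∨ d.contains k0 = true := by
  induction ks with
  | nil => intro d k0; simp
  | cons k ks ih =>
    intro d k0
    rw [List.foldl_cons, ih, PySem.Dict.contains_modify]
    simp only [List.mem_cons, Bool.or_eq_true, beq_iff_eq]
    tauto

-- materialisation: the fresh bucket satisfies the bucket invariant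
lemma pv_materialize_IB (s : String) (T : PySem.Set String)
    (bylen : PySem.Dict Int (PySem.Set String)) (L : List String)
    (hT : ∀ x, x ∈ T ↔ x ∈ L) (hB : pvIB L bylen) :
    pvIB L (pvMaterialize s T bylen) := by
  unfold pvMaterialize
  split_ifs with h
  · exact hB
  · intro k hk x
    rw [PySem.Dict.getD_insert]
    rw [PySem.Dict.contains_insert, Bool.or_eq_true, beq_iff_eq] at hk
    by_cases hks : k = PySem.Str.len s
    · subst hks
      rw [if_pos rfl, PySem.Set.mem_ofList, List.mem_map]
      constructor
      · rintro ⟨a, ha, rfl⟩; exact ⟨a, (hT a).mp ha, rfl⟩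
      · rintro ⟨a, ha, rfl⟩; exact ⟨a, (hT a).mpr ha, rfl⟩
    · rw [if_neg hks]
      exact hB k (by tauto) x

lemma pv_materialize_contains_self (s : String) (T : PySem.Set String)
    (bylen : PySem.Dict Int (PySem.Set String)) :
    (pvMaterialize s T bylen).contains (PySem.Str.len s) = true := by
  unfold pvMaterialize
  split_ifs with h
  · exact h
  · exact PySem.Dict.contains_insert_self _ _ _

lemma pv_materialize_nodup (s : String) (T : PySem.Set String)
    (bylen : PySem.Dict Int (PySem.Set String)) (h : bylen.keys.Nodup) :
    (pvMaterialize s T bylen).keys.Nodup := by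
  unfold pvMaterialize
  split_ifs with hc
  · exact h
  · exact PySem.Dict.nodup_keys_insert _ _ _ h

lemma pvConflict_snd (s : String) (T : PySem.Set String) (Lens : PySem.Set Int)
    (bylen : PySem.Dict Int (PySem.Set String)) :
    (pvConflict s T Lens bylen).2 = pvMaterialize s T bylen := by
  unfold pvConflict
  split_ifs <;> rfl

-- the conflict flag decides exactly the prefix-clash relation against L
lemma pvConflict_fst (s : String) (T : PySem.Set String) (Lens : PySem.Set Int)
    (bylen : PySem.Dict Int (PySem.Set String)) (L : List String)
    (hT : ∀ x, x ∈ T ↔ x ∈ L)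
    (hL : ∀ l, l ∈ Lens ↔ ∃ a ∈ L, l = PySem.Str.len a)
    (hB : pvIB L bylen) :
    (pvConflict s T Lens bylen).1 = true ↔ ∃ a ∈ L, pvRel s a := by
  have hB' := pv_materialize_IB s T bylen L hT hB
  have hself := pv_materialize_contains_self s T bylen
  have hmem : PySem.Set.contains
      ((pvMaterialize s T bylen).getD (PySem.Str.len s) PySem.Set.empty) s = true
      ↔ ∃ a ∈ L, s.toList <+: a.toList := by
    rw [pv_contains_iff, hB' _ hself s]
    constructor
    · rintro ⟨a, ha, hx⟩; exact ⟨a, ha, (pv_eq_slice_iff s a).mp hx⟩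
    · rintro ⟨a, ha, hx⟩; exact ⟨a, ha, (pv_eq_slice_iff s a).mpr hx⟩
  unfold pvConflict
  split_ifs with h
  · simp only [true_iff]
    obtain ⟨a, ha, hpre⟩ := hmem.mp h
    exact ⟨a, ha, Or.inl hpre⟩
  · rw [pv_any_len_iff s T Lens L hT hL]
    constructor
    · rintro ⟨a, ha, hpre⟩; exact ⟨a, ha, Or.inr hpre⟩
    · rintro ⟨a, ha, hpre | hsuf⟩
      · exact absurd (hmem.mpr ⟨a, ha, hpre⟩) h
      · exact ⟨a, ha, hsuf⟩

-- recording an accepted pair preserves the invariant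
lemma pv_record_inv (allowed : List (String × String)) (T : PySem.Set String)
    (Lens : PySem.Set Int) (bylen : PySem.Dict Int (PySem.Set String))
    (ft : String × String) (h : pvInv allowed T Lens bylen) :
    pvInv (allowed ++ [ft])
      (([ft.1, ft.2]).foldl pvRecord (T, Lens, bylen)).1
      (([ft.1, ft.2]).foldl pvRecord (T, Lens, bylen)).2.1
      (([ft.1, ft.2]).foldl pvRecord (T, Lens, bylen)).2.2 := by
  obtain ⟨hT, hL, hB, hnd⟩ := h
  have hstrs : ∀ x, x ∈ pvStrs (allowed ++ [ft]) ↔ x ∈ pvStrs allowed ∨ x = ft.1 ∨ x = ft.2 := by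
    intro x; simp [pvStrs, List.mem_flatMap]
  simp only [List.foldl_cons, List.foldl_nil, pvRecord]
  have hnd1 : (bylen.keys.foldl
      (fun d k => d.modify k PySem.Set.empty
        (fun S => PySem.Set.add S (PySem.Str.slice ft.1 none (some k)))) bylen).keys.Nodup := by
    exact PySem.Dict.nodup_keys_foldl_modify_key bylen.keys (fun k => k) PySem.Set.empty
      (fun _ k => (fun S => PySem.Set.add S (PySem.Str.slice ft.1 none (some k)))) bylen hnd
  have hcont1 : ∀ k0, (bylen.keys.foldl
      (fun d k => d.modify k PySem.Set.empty
        (fun S => PySem.Set.add S (PySem.Str.slice ft.1 none (some k)))) bylen).contains k0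
        = true ↔ bylen.contains k0 = true := by
    intro k0
    rw [pv_foldl_modify_contains]
    constructor
    · rintro (hk | hk)
      · exact (PySem.Dict.contains_iff_mem_keys _ _).mpr hk
      · exact hk
    · exact fun hk => Or.inr hk
  refine ⟨?_, ?_, ?_, ?_⟩
  · intro x
    simp only [PySem.Set.mem_add, hstrs, hT]
    tauto
  · intro l
    simp only [PySem.Set.mem_add, hL]
    constructor
    · rintro ((⟨a, ha, rfl⟩ | rfl) | rfl)
      · exact ⟨a, (hstrs a).mpr (Or.inl ha), rfl⟩
      · exact ⟨ft.1, (hstrs _).mpr (Or.inr (Or.inl rfl)), rfl⟩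
      · exact ⟨ft.2, (hstrs _).mpr (Or.inr (Or.inr rfl)), rfl⟩
    · rintro ⟨a, ha, rfl⟩
      rcases (hstrs a).mp ha with h | rfl | rfl
      · exact Or.inl (Or.inl ⟨a, h, rfl⟩)
      · exact Or.inl (Or.inr rfl)
      · exact Or.inr rfl
  · intro k0 hk0 x
    rw [pv_foldl_modify_getD _ _ _ _ hnd1, pv_foldl_modify_getD _ _ _ _ hnd]
    rw [pv_foldl_modify_contains, hcont1 k0] at hk0
    have hkc : bylen.contains k0 = true := by
      rcases hk0 with hk | hk
      · exact (hcont1 k0).mp ((PySem.Dict.contains_iff_mem_keys _ _).mpr hk)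
      · exact hk
    have hkeys1 : k0 ∈ (bylen.keys.foldl
        (fun d k => d.modify k PySem.Set.empty
          (fun S => PySem.Set.add S (PySem.Str.slice ft.1 none (some k)))) bylen).keys :=
      (PySem.Dict.contains_iff_mem_keys _ _).mp ((hcont1 k0).mpr hkc)
    have hkeys : k0 ∈ bylen.keys := (PySem.Dict.contains_iff_mem_keys _ _).mp hkc
    rw [if_pos hkeys1, if_pos hkeys]
    simp only [PySem.Set.mem_add, hB k0 hkc x]
    constructor
    · rintro ((⟨a, ha, rfl⟩ | rfl) | rfl)
      · exact ⟨a, (hstrs a).mpr (Or.inl ha), rfl⟩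
      · exact ⟨ft.1, (hstrs _).mpr (Or.inr (Or.inl rfl)), rfl⟩
      · exact ⟨ft.2, (hstrs _).mpr (Or.inr (Or.inr rfl)), rfl⟩
    · rintro ⟨a, ha, rfl⟩
      rcases (hstrs a).mp ha with h | rfl | rfl
      · exact Or.inl (Or.inl ⟨a, h, rfl⟩)
      · exact Or.inl (Or.inr rfl)
      · exact Or.inr rfl
  · exact PySem.Dict.nodup_keys_foldl_modify_key _ (fun k => k) PySem.Set.empty
      (fun _ k => (fun S => PySem.Set.add S (PySem.Str.slice ft.2 none (some k)))) _ hnd1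

lemma pv_loop_eq (cps : List (String × String)) :
    ∀ (allowed : List (String × String)) (T : PySem.Set String) (Lens : PySem.Set Int)
      (bylen : PySem.Dict Int (PySem.Set String)), pvInv allowed T Lens bylen →
      cps.foldl pvStepA allowed = (cps.foldl pvStepB (allowed, T, Lens, bylen)).1 := by
  induction cps with
  | nil => intro allowed T Lens bylen _; rfl
  | cons ft rest ih =>
    intro allowed T Lens bylen hinv
    obtain ⟨hT, hL, hB, hnd⟩ := hinv
    simp only [List.foldl_cons]
    have hc1 := pvConflict_fst ft.1 T Lens bylen _ hT hL hB
    have hs1 := pvConflict_snd ft.1 T Lens bylen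
    have hB1 : pvIB (pvStrs allowed) (pvConflict ft.1 T Lens bylen).2 := by
      rw [hs1]; exact pv_materialize_IB _ _ _ _ hT hB
    have hnd1 : (pvConflict ft.1 T Lens bylen).2.keys.Nodup := by
      rw [hs1]; exact pv_materialize_nodup _ _ _ hnd
    have hc2 := pvConflict_fst ft.2 T Lens (pvConflict ft.1 T Lens bylen).2 _ hT hL hB1
    have hs2 := pvConflict_snd ft.2 T Lens (pvConflict ft.1 T Lens bylen).2
    have hB2 : pvIB (pvStrs allowed) (pvConflict ft.2 T Lens (pvConflict ft.1 T Lens bylen).2).2 := by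
      rw [hs2]; exact pv_materialize_IB _ _ _ _ hT hB1
    have hnd2 : (pvConflict ft.2 T Lens (pvConflict ft.1 T Lens bylen).2).2.keys.Nodup := by
      rw [hs2]; exact pv_materialize_nodup _ _ _ hnd1
    by_cases h1 : (pvConflict ft.1 T Lens bylen).1 = true
    · have hA : pvStepA allowed ft = allowed := by
        unfold pvStepA
        rw [if_pos ((pv_guard_iff ft.1 ft.2 allowed).mpr (Or.inl (hc1.mp h1)))]
      have hBstep : pvStepB (allowed, T, Lens, bylen) ft
          = (allowed, T, Lens, (pvConflict ft.1 T Lens bylen).2) := by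
        unfold pvStepB
        simp only [h1, if_true]
      rw [hA, hBstep]
      exact ih allowed T Lens _ ⟨hT, hL, hB1, hnd1⟩
    · by_cases h2 : (pvConflict ft.2 T Lens (pvConflict ft.1 T Lens bylen).2).1 = true
      · have hA : pvStepA allowed ft = allowed := by
          unfold pvStepA
          rw [if_pos ((pv_guard_iff ft.1 ft.2 allowed).mpr (Or.inr (hc2.mp h2)))]
        have hBstep : pvStepB (allowed, T, Lens, bylen) ft
            = (allowed, T, Lens, (pvConflict ft.2 T Lens (pvConflict ft.1 T Lens bylen).2).2) := by
          unfold pvStepB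
          simp only [h1, h2, if_true, if_false, Bool.false_eq_true]
        rw [hA, hBstep]
        exact ih allowed T Lens _ ⟨hT, hL, hB2, hnd2⟩
      · have hA : pvStepA allowed ft = allowed ++ [ft] := by
          unfold pvStepA
          rw [if_neg (fun hg => by
            rcases (pv_guard_iff ft.1 ft.2 allowed).mp hg with hx | hx
            · exact h1 (hc1.mpr hx)
            · exact h2 (hc2.mpr hx))]
        have hBstep : pvStepB (allowed, T, Lens, bylen) ft
            = (allowed ++ [ft], ([ft.1, ft.2]).foldl pvRecord
                (T, Lens, (pvConflict ft.2 T Lens (pvConflict ft.1 T Lens bylen).2).2)) := by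
          unfold pvStepB
          simp only [h1, h2, if_false, Bool.false_eq_true]
        rw [hA, hBstep]
        have hrec := pv_record_inv allowed T Lens
          (pvConflict ft.2 T Lens (pvConflict ft.1 T Lens bylen).2).2 ft ⟨hT, hL, hB2, hnd2⟩
        exact ih _ _ _ _ hrec

-- ===== VERDICT (by name: the statement is the Claim_ definition above) =====
theorem get_compatible_concurrent_copies_spec : Claim_equal_get_compatible_concurrent_copies := by
  intro copy_paths _
  unfold Spec_get_compatible_concurrent_copies get_compatible_concurrent_copies
    get_compatible_concurrent_copies_alt
  exact pv_loop_eq copy_paths [] PySem.Set.empty PySem.Set.empty PySem.Dict.empty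
    ⟨by simp [PySem.Set.empty, pvStrs],
     by simp [PySem.Set.empty, pvStrs],
     by intro k hk; simp [PySem.Dict.contains_empty] at hk,
     by simp [PySem.Dict.keys_empty]⟩
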